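-- pv_equiv track=rewrite | github.com/Amine-Nova/Django-Piscine | Django04/ex03/views.py | colors_shade
-- ===== SOURCE A (Python) =====
-- def colors_shade(color):
--     hexabase = ['0', '1', '2', '3', '4', '5', '6', '7', '8', '9', 'a', 'b', 'c', 'd', 'e', 'f']
--     hex = '04'
--     ff = 'ff'
--     increment = 4
--     steps = 50
--
--     i = 0
--     colors = []
--     while(i < steps):
--         indice = (hexabase.index(hex[1]) + increment)
--         if (indice >= 16 and hex[0] != 'f'):
--             hex = hexabase[hexabase.index(hex[0]) + 1] + hex[:1]
--         hex = hex[:1] + hexabase[indice % 16]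
--         if (color == 'R'):
--             colors.append("#" + ff + hex + hex)
--         elif (color == 'G'):
--             colors.append("#" + hex + ff + hex)
--         elif (color == 'B'):
--             colors.append("#" + hex + hex + ff)
--         else:
--             colors.append("#" + hex + hex + hex)
--         i += 1
--     return colors
-- ===== SOURCE B (Python) =====
-- def colors_shade(color):
--     # closed form: in 50 steps the two-digit hex value is exactly 4*(i+2) (the carry cap never fires)
--     shades = ['%02x' % (4 * (i + 2)) for i in range(50)]
--     if color == 'R':
--         return ['#ff' + h + h for h in shades]
--     if color == 'G':
--         return ['#' + h + 'ff' + h for h in shades]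
--     if color == 'B':
--         return ['#' + h + h + 'ff' for h in shades]
--     return ['#' + h + h + h for h in shades]
-- ===== Notes on version B (the rewrite author's own statement) =====
-- stated objective: simpler
-- what changed: Replaced the hex-digit-list .index/carry bookkeeping loop with a closed-form list of the 50 shade values 4*(i+2) formatted as two hex digits, mapped once through the colour template chosen by a single branch.
import Mathlib
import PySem

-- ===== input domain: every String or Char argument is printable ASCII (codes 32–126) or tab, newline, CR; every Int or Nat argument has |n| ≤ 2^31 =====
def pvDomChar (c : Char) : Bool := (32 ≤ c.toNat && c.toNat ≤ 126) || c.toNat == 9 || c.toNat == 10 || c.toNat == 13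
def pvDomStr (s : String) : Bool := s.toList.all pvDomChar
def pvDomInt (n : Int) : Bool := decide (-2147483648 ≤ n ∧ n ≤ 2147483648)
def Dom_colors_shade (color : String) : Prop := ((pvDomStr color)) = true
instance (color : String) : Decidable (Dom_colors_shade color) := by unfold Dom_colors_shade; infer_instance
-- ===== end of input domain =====

-- B replaces A's digit-list .index/carry loop with a closed-form list of the 50 shade
-- values 4*(i+2) rendered as two hex digits, mapped once through the colour template (simpler).

-- ===== PORT A =====
-- A's hexabase list of one-character strings, kept as characters (Python strings of length 1).
def csHexabase : List Char :=
  ['0', '1', '2', '3', '4', '5', '6', '7', '8', '9', 'a', 'b', 'c', 'd', 'e', 'f']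

-- A's while loop, one recursive call per iteration over the same state (hex, colors).
-- The `.getD` defaults are never taken: hex always has length 2 and both its characters
-- are members of csHexabase throughout the 50 iterations, so pyGetD/index? always succeed
-- exactly as Python's hex[i] / hexabase.index do.
def csLoopA (color : String) : Nat → List Char → List String → List String
  | 0, _, colors => colors
  | fuel + 1, hex, colors =>
    let indice : Int :=
      ((PySem.List.index? csHexabase (PySem.List.pyGetD hex 1 ' ')).getD 0 : Nat) + 4
    let hex :=
      if indice ≥ 16 && PySem.List.pyGetD hex 0 ' ' != 'f' then
        [PySem.List.pyGetD csHexabase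
          (((PySem.List.index? csHexabase (PySem.List.pyGetD hex 0 ' ')).getD 0 : Nat) + 1) ' ']
          ++ hex.take 1
      else hex
    let hex := hex.take 1 ++ [PySem.List.pyGetD csHexabase (PySem.Int.mod indice 16) ' ']
    let entry :=
      if color == "R" then String.ofList ('#' :: 'f' :: 'f' :: (hex ++ hex))
      else if color == "G" then String.ofList ('#' :: (hex ++ 'f' :: 'f' :: hex))
      else if color == "B" then String.ofList ('#' :: (hex ++ hex ++ ['f', 'f']))
      else String.ofList ('#' :: (hex ++ hex ++ hex))
    csLoopA color fuel hex (colors ++ [entry])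

def colors_shade (color : String) : List String :=
  csLoopA color 50 ['0', '4'] []

-- ===== PORT B =====
-- '%x' hex digit of n < 16
def csHexChar (n : Nat) : Char :=
  Char.ofNat (if n < 10 then 48 + n else 87 + n)

-- shades = ['%02x' % (4*(i+2)) for i in range(50)]
def csShadesB : List (List Char) :=
  (List.range 50).map (fun i =>
    let v := 4 * (i + 2)
    [csHexChar (v / 16), csHexChar (v % 16)])

def colors_shade_alt (color : String) : List String :=
  if color == "R" then csShadesB.map (fun h => String.ofList ('#' :: 'f' :: 'f' :: (h ++ h)))
  else if color == "G" then csShadesB.map (fun h => String.ofList ('#' :: (h ++ 'f' :: 'f' :: h)))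
  else if color == "B" then csShadesB.map (fun h => String.ofList ('#' :: (h ++ h ++ ['f', 'f'])))
  else csShadesB.map (fun h => String.ofList ('#' :: (h ++ h ++ h)))

-- ===== PRECONDITION & SPEC =====
def Spec_colors_shade (color : String) (out : List String) : Prop := out = colors_shade_alt color
instance (color : String) (out : List String) : Decidable (Spec_colors_shade color out) := by unfold Spec_colors_shade; infer_instance

-- ===== CLAIM (what is proved, stated in full; the proofs are below) =====
def Claim_equal_colors_shade : Prop := ∀ (color : String), Dom_colors_shade color → Spec_colors_shade color (colors_shade color)

-- ===== LEMMAS AND PROOFS =====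

-- A's loop depends on `color` only through the three == tests; when all three fail it
-- computes the same list as it does for the literal "x" (also none of R/G/B).
theorem csLoopA_other (color : String) (hR : color ≠ "R") (hG : color ≠ "G") (hB : color ≠ "B") :
    ∀ (fuel : Nat) (hex : List Char) (colors : List String),
      csLoopA color fuel hex colors = csLoopA "x" fuel hex colors := by
  intro fuel
  induction fuel with
  | zero => intro hex colors; rfl
  | succ n ih =>
    intro hex colors
    simp only [csLoopA, beq_iff_eq, hR, hG, hB, if_false]
    exact ih _ _

-- ===== VERDICT (by name: the statement is the Claim_ definition above) =====
theorem colors_shade_spec : Claim_equal_colors_shade := by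
  intro color _
  unfold Spec_colors_shade
  by_cases hR : color = "R"
  · subst hR; decide
  by_cases hG : color = "G"
  · subst hG; decide
  by_cases hB : color = "B"
  · subst hB; decide
  have hA : colors_shade color = colors_shade "x" := by
    unfold colors_shade; exact csLoopA_other color hR hG hB 50 _ _
  have hB' : colors_shade_alt color = colors_shade_alt "x" := by
    simp only [colors_shade_alt, beq_iff_eq, hR, hG, hB, if_false]; decide
  rw [hA, hB']
  decide
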